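-- pv_equiv track=rewrite | github.com/qwerty16/adventofcode | 2015/day 5/main.py | contains_three_vowels
-- ===== SOURCE A (Python) =====
-- def contains_three_vowels(string):
--     vowels = ["a", "e", "i", "o", "u"]
--     vowel_count = 0
--     for character in string:
--         if character in vowels:
--             vowel_count += 1
--     if vowel_count >= 3:
--         return True
--
--     return False
-- ===== SOURCE B (Python) =====
-- def contains_three_vowels(string):
--     return sum(string.count(v) for v in "aeiou") >= 3
-- ===== Notes on version B (the rewrite author's own statement) =====
-- stated objective: idiomatic
-- what changed: Replaces the per-character membership loop and running counter with five str.count scans driven by the vowel alphabet, summed and compared to 3 in one expression.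
import Mathlib
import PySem

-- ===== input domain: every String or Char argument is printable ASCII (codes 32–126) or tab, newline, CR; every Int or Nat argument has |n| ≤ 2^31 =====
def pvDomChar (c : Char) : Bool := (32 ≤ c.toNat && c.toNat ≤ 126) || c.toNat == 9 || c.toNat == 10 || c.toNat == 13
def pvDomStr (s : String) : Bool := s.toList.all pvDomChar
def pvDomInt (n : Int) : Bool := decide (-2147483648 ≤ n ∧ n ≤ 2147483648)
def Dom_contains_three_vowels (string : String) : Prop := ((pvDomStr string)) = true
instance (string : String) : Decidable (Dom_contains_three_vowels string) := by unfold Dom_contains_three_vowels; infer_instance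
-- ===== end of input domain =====

-- B sums str.count over the vowel alphabet instead of A's per-character membership loop; same result, more idiomatic.

-- ===== PORT A =====
def contains_three_vowels (string : String) : Bool :=
  let vowels : List String := ["a", "e", "i", "o", "u"]
  let vowel_count := string.toList.foldl
    (fun acc character => if (String.ofList [character]) ∈ vowels then acc + 1 else acc) (0 : Int)
  if vowel_count ≥ 3 then true else false

-- ===== PORT B =====
def contains_three_vowels_alt (string : String) : Bool :=
  decide (3 ≤ (("aeiou".toList).map (fun v => PySem.Str.count string (String.ofList [v]))).sum)

-- ===== PRECONDITION & SPEC =====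
def Spec_contains_three_vowels (string : String) (out : Bool) : Prop := out = contains_three_vowels_alt string
instance (string : String) (out : Bool) : Decidable (Spec_contains_three_vowels string out) := by unfold Spec_contains_three_vowels; infer_instance

-- ===== CLAIM (what is proved, stated in full; the proofs are below) =====
def Claim_equal_contains_three_vowels : Prop := ∀ (string : String), Dom_contains_three_vowels string → Spec_contains_three_vowels string (contains_three_vowels string)

-- ===== LEMMAS AND PROOFS =====

theorem count_go_single (c : Char) (l : List Char) :
    ∀ acc, PySem.Chars.count.go [c] l.length l acc = acc + l.count c := by
  induction l with
  | nil => intro acc; simp [PySem.Chars.count.go]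
  | cons h t ih =>
    intro acc
    simp only [List.length_cons, PySem.Chars.count.go, List.count_cons]
    by_cases hc : h = c
    · simp [hc, List.isPrefixOf, ih]; omega
    · simp [List.isPrefixOf, hc, Ne.symm hc, ih]

theorem count_single (s : String) (c : Char) :
    PySem.Str.count s (String.ofList [c]) = s.toList.count c := by
  rw [PySem.Str.count_eq]
  simp only [PySem.Chars.count, String.toList_ofList]
  simpa using count_go_single c s.toList 0

theorem ofList_single_eq_iff (c d : Char) : String.ofList [c] = String.ofList [d] ↔ c = d := by
  constructor
  · intro h
    have := congrArg String.toList h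
    simpa using this
  · intro h; rw [h]

theorem countP_vowels (l : List Char) :
    l.countP (fun c => decide (c ∈ (['a','e','i','o','u'] : List Char)))
      = l.count 'a' + l.count 'e' + l.count 'i' + l.count 'o' + l.count 'u' := by
  induction l with
  | nil => simp
  | cons h t ih =>
    simp only [List.countP_cons, List.count_cons, ih]
    split_ifs <;> simp_all <;> omega

-- ===== VERDICT (by name: the statement is the Claim_ definition above) =====
theorem contains_three_vowels_spec : Claim_equal_contains_three_vowels := by
  intro s _
  unfold Spec_contains_three_vowels
  simp only [contains_three_vowels, contains_three_vowels_alt]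
  rw [show (fun (acc : Int) (character : Char) => if (String.ofList [character]) ∈ (["a","e","i","o","u"]:List String) then acc + 1 else acc)
        = (fun acc c => if decide (c ∈ (['a','e','i','o','u']:List Char)) = true then acc + 1 else acc) from by
      funext acc c
      congr 1
      show ((String.ofList [c]) ∈ (["a","e","i","o","u"]:List String)) = _
      simp only [List.mem_cons, List.not_mem_nil, or_false]
      rw [show ("a":String) = String.ofList ['a'] from rfl, show ("e":String) = String.ofList ['e'] from rfl,
          show ("i":String) = String.ofList ['i'] from rfl, show ("o":String) = String.ofList ['o'] from rfl,
          show ("u":String) = String.ofList ['u'] from rfl]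
      simp only [ofList_single_eq_iff]
      simp]
  rw [PySem.List.foldl_if_add_one, countP_vowels]
  simp only [show ("aeiou".toList) = ['a','e','i','o','u'] from rfl, List.map_cons, List.map_nil,
    List.sum_cons, List.sum_nil, count_single, ge_iff_le]
  split_ifs with h
  · symm; simp; omega
  · symm; simp; omega
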